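-- pv_equiv track=rewrite | github.com/cimpresovec/advent_of_code_2019 | src/day_04/solution.py | is_valid_extra
-- ===== SOURCE A (Python) =====
-- def is_valid_extra(number: int) -> bool:
--     digits = [int(d) for d in str(number)]
--     if len(digits) != 6:
--         return False
--     pair = False
--     i = 1
--     while i < len(digits):
--         if digits[i] < digits[i - 1]:
--             return False
--         count = 0
--         # Damn son this ugly
--         while digits[i] == digits[i - 1]:
--             count += 1
--             if i + 1 == len(digits):
--                 if count == 1:
--                     pair = True
--                 break
--             elif digits[i+1] != digits[i]:
--                 if count == 1:
--                     pair = True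
--                 break
--             i += 1
--         i += 1
--     return pair
-- ===== SOURCE B (Python) =====
-- def leading_run(digits):
--     # length of the run of equal digits at the front (>= 1 for non-empty input)
--     if len(digits) >= 2 and digits[1] == digits[0]:
--         return 1 + leading_run(digits[1:])
--     return 1
--
--
-- def has_exact_pair(digits):
--     # run-length scan: peel off the leading run, succeed iff some run has length exactly 2
--     if not digits:
--         return False
--     run = leading_run(digits)
--     return run == 2 or has_exact_pair(digits[run:])
--
--
-- def is_valid_extra(number: int) -> bool:
--     digits = [int(d) for d in str(number)]
--     if len(digits) != 6:
--         return False
--     if any(a > b for a, b in zip(digits, digits[1:])):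
--         return False
--     return has_exact_pair(digits)
-- ===== Notes on version B (the rewrite author's own statement) =====
-- stated objective: simpler
-- what changed: Replaced A's manual index walk with nested while-loops and a count variable by a pairwise zip check for monotonicity plus a recursive run-length scan (peel the leading run, succeed iff some run has length exactly 2).
import Mathlib
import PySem

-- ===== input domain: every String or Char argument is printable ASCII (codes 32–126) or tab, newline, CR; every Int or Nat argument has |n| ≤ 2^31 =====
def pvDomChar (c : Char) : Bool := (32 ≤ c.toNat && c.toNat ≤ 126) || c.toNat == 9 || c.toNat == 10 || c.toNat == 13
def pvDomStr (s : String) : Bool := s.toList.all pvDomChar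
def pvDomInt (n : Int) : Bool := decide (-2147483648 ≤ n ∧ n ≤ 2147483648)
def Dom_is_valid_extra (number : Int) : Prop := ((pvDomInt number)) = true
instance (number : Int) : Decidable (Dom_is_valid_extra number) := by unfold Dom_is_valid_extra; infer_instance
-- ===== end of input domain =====

-- B replaces A's manual index walk (nested while-loops with a count variable) by a pairwise
-- monotonicity check plus a recursive run-length scan; objective: simpler. Equal on Pre_ (0 ≤ number;
-- Python raises ValueError on the '-' character of negative inputs, for A and B alike).


-- ===== PORT A =====
-- inner `while digits[i] == digits[i-1]` loop; returns (final i, whether `pair` gets set).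
-- Indices are nonnegative and in range whenever the loop runs, so List.getD is exact here;
-- fuel = len(digits) bounds the iteration count (i strictly increases, starting ≥ 1).
def pvInnerA (ds : List Int) (i : Nat) (count : Nat) : Nat → Nat × Bool
  | 0 => (i, false)
  | fuel+1 =>
    if ds.getD i 0 == ds.getD (i-1) 0 then
      let count := count + 1
      if i + 1 = ds.length then (i, count == 1)
      else if ds.getD (i+1) 0 != ds.getD i 0 then (i, count == 1)
      else pvInnerA ds (i+1) count fuel
    else (i, false)

-- outer `while i < len(digits)` loop; fuel = len(digits) again bounds the iterations
def pvOuterA (ds : List Int) (i : Nat) (pair : Bool) : Nat → Bool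
  | 0 => pair
  | fuel+1 =>
    if i < ds.length then
      if ds.getD i 0 < ds.getD (i-1) 0 then false
      else
        let r := pvInnerA ds i 0 ds.length
        pvOuterA ds (r.1 + 1) (pair || r.2) fuel
    else pair

-- `[int(d) for d in str(number)]`; for number ≥ 0 (Pre_) every char is a digit so int() succeeds;
-- the `.getD 0` default is taken only where Python raises ('-' of a negative), excluded by Pre_
def is_valid_extra (number : Int) : Bool :=
  let digits := (PySem.Int.toChars number).map fun c => (PySem.Int.ofChars? [c]).getD 0
  if digits.length ≠ 6 then false
  else pvOuterA digits 1 false digits.length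

-- ===== PORT B =====
-- length of the run of equal digits at the front (Source B's leading_run)
def leadingRun : List Int → Nat
  | a :: b :: rest => if b == a then 1 + leadingRun (b :: rest) else 1
  | _ => 1

-- Source B's has_exact_pair; the recursion drops ≥ 1 element per call, fuel = len(digits) bounds it
def hasExactPair (ds : List Int) : Nat → Bool
  | 0 => false
  | fuel+1 =>
    if ds.isEmpty then false
    else
      let run := leadingRun ds
      run == 2 || hasExactPair (ds.drop run) fuel

def is_valid_extra_alt (number : Int) : Bool :=
  let digits := (PySem.Int.toChars number).map fun c => (PySem.Int.ofChars? [c]).getD 0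
  if digits.length ≠ 6 then false
  else if (digits.zip (digits.drop 1)).any (fun p => decide (p.1 > p.2)) then false
  else hasExactPair digits digits.length

-- ===== PRECONDITION & SPEC =====
-- Pre_ excludes exactly the negative inputs: there str(number) starts with '-' and int('-')
-- raises ValueError in Python (both in A and in B), so A returns no value.
def Pre_is_valid_extra (number : Int) : Prop := 0 ≤ number
instance (number : Int) : Decidable (Pre_is_valid_extra number) := by unfold Pre_is_valid_extra; infer_instance
def pvWitness_is_valid_extra : Int := (123455)

def Spec_is_valid_extra (number : Int) (out : Bool) : Prop := out = is_valid_extra_alt number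
instance (number : Int) (out : Bool) : Decidable (Spec_is_valid_extra number out) := by unfold Spec_is_valid_extra; infer_instance

-- ===== CLAIM (what is proved, stated in full; the proofs are below) =====
def Claim_equal_is_valid_extra : Prop := ∀ (number : Int), Dom_is_valid_extra number → Pre_is_valid_extra number → Spec_is_valid_extra number (is_valid_extra number)

-- ===== LEMMAS AND PROOFS =====
-- three-way case split on an adjacent pair, in the negation-bearing form simp_all can rewrite with
theorem pvTri (x y : Int) : y = x ∨ (¬y = x ∧ y < x) ∨ (¬y = x ∧ ¬y < x) := by omega

-- A's loop = B's check on an arbitrary 6-digit list: every branch condition of either program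
-- compares adjacent elements, so a 3-way split on the five adjacent pairs decides everything
set_option maxHeartbeats 4000000 in
theorem pvCore6 (a b c d e f : Int) :
    pvOuterA [a,b,c,d,e,f] 1 false 6 =
      (if ([a,b,c,d,e,f].zip [b,c,d,e,f]).any (fun p => decide (p.1 > p.2)) then false
       else hasExactPair [a,b,c,d,e,f] 6) := by
  rcases pvTri a b with h1|⟨h1,h1'⟩|⟨h1,h1'⟩ <;>
  rcases pvTri b c with h2|⟨h2,h2'⟩|⟨h2,h2'⟩ <;>
  rcases pvTri c d with h3|⟨h3,h3'⟩|⟨h3,h3'⟩ <;>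
  rcases pvTri d e with h4|⟨h4,h4'⟩|⟨h4,h4'⟩ <;>
  rcases pvTri e f with h5|⟨h5,h5'⟩|⟨h5,h5'⟩ <;>
  simp_all [pvOuterA, pvInnerA, hasExactPair, leadingRun]

theorem pvCoreEq (ds : List Int) :
    (if ds.length ≠ 6 then false else pvOuterA ds 1 false ds.length) =
      (if ds.length ≠ 6 then false
       else if (ds.zip (ds.drop 1)).any (fun p => decide (p.1 > p.2)) then false
       else hasExactPair ds ds.length) := by
  by_cases h6 : ds.length = 6
  · rcases ds with _|⟨a,_|⟨b,_|⟨c,_|⟨d,_|⟨e,_|⟨f,_|⟨g,t⟩⟩⟩⟩⟩⟩⟩ <;> simp_all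
    simpa using pvCore6 a b c d e f
  · simp [h6]

-- ===== VERDICT (by name: the statement is the Claim_ definition above) =====
theorem is_valid_extra_spec : Claim_equal_is_valid_extra := by
  intro number _ _
  unfold Spec_is_valid_extra is_valid_extra is_valid_extra_alt
  exact pvCoreEq _
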